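-- pv_equiv track=rewrite | github.com/Trummler12/Schoolsystem2 | backend/src/main/resources/scripts/topics/restructure_disciplines_csv.py | collect_subtree
-- ===== SOURCE A (Python) =====
-- def collect_subtree(rows, prefix):
--     subtree = []
--     rest = []
--     for row in rows:
--         if row["key"] == prefix or row["key"].startswith(prefix + "."):
--             subtree.append(row)
--         else:
--             rest.append(row)
--     if subtree:
--         root = [row for row in subtree if row["key"] == prefix]
--         others = [row for row in subtree if row["key"] != prefix]
--         subtree = root + others
--     return subtree, rest
-- ===== SOURCE B (Python) =====
-- def collect_subtree(rows, prefix):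
--     dotted = prefix + "."
--
--     def cat(row):
--         k = row["key"]
--         return 0 if k == prefix else (1 if k.startswith(dotted) else 2)
--
--     ordered = sorted(rows, key=cat)
--     cut = sum(1 for row in rows if cat(row) < 2)
--     return ordered[:cut], ordered[cut:]
-- ===== Notes on version B (the rewrite author's own statement) =====
-- stated objective: alternative
-- what changed: B stable-sorts the rows by a 3-valued category key (root=0, dotted descendant=1, other=2) and splits the sorted list at the count of category<2 rows, instead of A's partition loop followed by two filter passes over the matched subset.
-- outside the precondition, e.g. on collect_subtree([{'id': '1'}], 'a'): A raises KeyError, B raises KeyError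
import Mathlib
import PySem

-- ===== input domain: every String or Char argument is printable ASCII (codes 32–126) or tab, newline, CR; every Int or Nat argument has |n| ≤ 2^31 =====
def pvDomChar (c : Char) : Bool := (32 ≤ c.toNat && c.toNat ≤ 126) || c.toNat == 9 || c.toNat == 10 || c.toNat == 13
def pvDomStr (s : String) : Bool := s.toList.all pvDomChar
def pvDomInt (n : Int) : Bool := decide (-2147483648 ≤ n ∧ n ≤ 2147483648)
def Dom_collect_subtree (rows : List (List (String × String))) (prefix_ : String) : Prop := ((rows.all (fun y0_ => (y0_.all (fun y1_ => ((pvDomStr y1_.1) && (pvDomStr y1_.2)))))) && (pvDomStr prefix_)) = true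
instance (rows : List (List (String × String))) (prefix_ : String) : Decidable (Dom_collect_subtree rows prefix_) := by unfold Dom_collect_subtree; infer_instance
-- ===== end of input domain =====

-- B replaces A's partition-then-refilter with a stable sort by a 3-valued category key and a
-- split at the count of matching rows (same result; a different algorithm, not claimed faster).

-- row["key"]: first-match lookup in the association list (Python dict lookup); the "" default is
-- never reached inside Pre_collect_subtree, where every row has a "key" entry.
def pvRowKey (row : List (String × String)) : String :=
  (((row.find? (fun p => p.1 == "key")).map Prod.snd).getD "")

-- ===== PORT A =====
def collect_subtree (rows : List (List (String × String))) (prefix_ : String) : (List (List (String × String))) × (List (List (String × String))) :=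
  let sr := rows.foldl (fun (acc : List (List (String × String)) × List (List (String × String))) row =>
      if pvRowKey row == prefix_ || PySem.Str.startswith (pvRowKey row) (prefix_ ++ ".") then
        (acc.1 ++ [row], acc.2)
      else
        (acc.1, acc.2 ++ [row])) ([], [])
  let subtree := sr.1
  let rest := sr.2
  let subtree :=
    if subtree ≠ [] then
      (subtree.filter (fun row => pvRowKey row == prefix_)) ++
      (subtree.filter (fun row => ¬ (pvRowKey row == prefix_)))
    else subtree
  (subtree, rest)

-- ===== PORT B =====
def pvCat (prefix_ dotted : String) (row : List (String × String)) : Int :=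
  if pvRowKey row == prefix_ then 0
  else if PySem.Str.startswith (pvRowKey row) dotted then 1 else 2

def collect_subtree_alt (rows : List (List (String × String))) (prefix_ : String) : (List (List (String × String))) × (List (List (String × String))) :=
  let dotted := prefix_ ++ "."
  let ordered := PySem.List.sorted rows (pvCat prefix_ dotted)
  let cut : Int := rows.foldl (fun n row => if pvCat prefix_ dotted row < 2 then n + 1 else n) 0
  (PySem.List.slice ordered none (some cut), PySem.List.slice ordered (some cut) none)

-- ===== PRECONDITION & SPEC =====
-- Pre_ excludes rows without a "key" entry, on which the Python A raises KeyError.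
def Pre_collect_subtree (rows : List (List (String × String))) (prefix_ : String) : Prop :=
  (rows.all (fun row => row.any (fun p => p.1 == "key"))) = true
instance (rows : List (List (String × String))) (prefix_ : String) : Decidable (Pre_collect_subtree rows prefix_) := by unfold Pre_collect_subtree; infer_instance
def pvWitness_collect_subtree : (List (List (String × String))) × String :=
  ([[("key", "a")], [("key", "a.b")], [("key", "c")]], "a")

def Spec_collect_subtree (rows : List (List (String × String))) (prefix_ : String) (out : (List (List (String × String))) × (List (List (String × String)))) : Prop := out = collect_subtree_alt rows prefix_
instance (rows : List (List (String × String))) (prefix_ : String) (out : (List (List (String × String))) × (List (List (String × String)))) : Decidable (Spec_collect_subtree rows prefix_ out) := by unfold Spec_collect_subtree; infer_instance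

-- ===== CLAIM (what is proved, stated in full; the proofs are below) =====
def Claim_equal_collect_subtree : Prop := ∀ (rows : List (List (String × String))) (prefix_ : String), Dom_collect_subtree rows prefix_ → Pre_collect_subtree rows prefix_ → Spec_collect_subtree rows prefix_ (collect_subtree rows prefix_)

-- ===== LEMMAS AND PROOFS =====

-- A's loop with accumulators: appends the cond-filter to the left list and the rest to the right.
theorem foldA_eq {α : Type} (c : α → Bool) :
    ∀ (rows : List α) (s r : List α),
      rows.foldl (fun (acc : List α × List α) row =>
        if c row then (acc.1 ++ [row], acc.2) else (acc.1, acc.2 ++ [row])) (s, r)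
      = (s ++ rows.filter c, r ++ rows.filter (fun x => ! c x)) := by
  intro rows
  induction rows with
  | nil => intro s r; simp
  | cons a t ih =>
      intro s r
      by_cases h : c a = true
      · simp [List.foldl, h, ih]
      · simp [List.foldl, h, ih]

-- B's counter loop equals the filtered length.
theorem foldCount_eq {α : Type} (p : α → Prop) [DecidablePred p] :
    ∀ (xs : List α) (n : Int),
      xs.foldl (fun m x => if p x then m + 1 else m) n
        = n + ((xs.filter (fun x => decide (p x))).length : Int) := by
  intro xs
  induction xs with
  | nil => intro n; simp
  | cons a t ih =>
      intro n
      by_cases h : p a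
      · simp [List.foldl, h, ih]; omega
      · simp [List.foldl, h, ih]

theorem insertBy_append {α : Type} (before : α → α → Bool) (x : α) :
    ∀ (a b : List α), (∀ y ∈ a, before x y = false) →
      PySem.List.insertBy before x (a ++ b) = a ++ PySem.List.insertBy before x b := by
  intro a
  induction a with
  | nil => intro b _; simp
  | cons y t ih =>
      intro b h
      have hy : before x y = false := h y (by simp)
      simp [PySem.List.insertBy, hy, ih b (fun z hz => h z (by simp [hz]))]

theorem insertBy_cons_of_forall {α : Type} (before : α → α → Bool) (x : α) :
    ∀ (l : List α), (∀ y ∈ l, before x y = true) →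
      PySem.List.insertBy before x l = x :: l := by
  intro l h
  cases l with
  | nil => simp [PySem.List.insertBy]
  | cons y t => simp [PySem.List.insertBy, h y (by simp)]

-- The insertion-sort fold with a 3-valued Int key keeps the accumulator as three stable blocks.
theorem foldl_insertBy_tri {α : Type} (key : α → Int)
    (h3 : ∀ x, key x = 0 ∨ key x = 1 ∨ key x = 2) :
    ∀ (xs f0 f1 f2 : List α),
      (∀ y ∈ f0, key y = 0) → (∀ y ∈ f1, key y = 1) → (∀ y ∈ f2, key y = 2) →
      xs.foldl (fun acc x => PySem.List.insertBy (fun a b => decide (key a < key b)) x acc)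
        ((f0 ++ f1) ++ f2)
      = ((f0 ++ xs.filter (fun x => key x == 0)) ++ (f1 ++ xs.filter (fun x => key x == 1)))
        ++ (f2 ++ xs.filter (fun x => key x == 2)) := by
  intro xs
  induction xs with
  | nil => intro f0 f1 f2 _ _ _; simp
  | cons x t ih =>
      intro f0 f1 f2 h0 h1 h2
      rcases h3 x with hx | hx | hx
      · have step : PySem.List.insertBy (fun a b => decide (key a < key b)) x ((f0 ++ f1) ++ f2)
            = ((f0 ++ [x]) ++ f1) ++ f2 := by
          rw [List.append_assoc, insertBy_append _ _ f0 (f1 ++ f2)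
              (by intro y hy; simp [h0 y hy, hx]),
            insertBy_cons_of_forall _ _ (f1 ++ f2)
              (by intro y hy; rcases List.mem_append.mp hy with h | h
                  · simp [h1 y h, hx]
                  · simp [h2 y h, hx])]
          simp
        rw [List.foldl_cons, step,
          ih (f0 ++ [x]) f1 f2
            (by intro y hy; rcases List.mem_append.mp hy with h | h
                · exact h0 y h
                · simp at h; simpa [h] using hx)
            h1 h2]
        simp [hx]
      · have step : PySem.List.insertBy (fun a b => decide (key a < key b)) x ((f0 ++ f1) ++ f2)
            = (f0 ++ (f1 ++ [x])) ++ f2 := by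
          rw [List.append_assoc, insertBy_append _ _ f0 (f1 ++ f2)
              (by intro y hy; simp [h0 y hy, hx]),
            insertBy_append _ _ f1 f2 (by intro y hy; simp [h1 y hy, hx]),
            insertBy_cons_of_forall _ _ f2 (by intro y hy; simp [h2 y hy, hx])]
          simp
        rw [List.foldl_cons, step]
        have := ih f0 (f1 ++ [x]) f2 h0
            (by intro y hy; rcases List.mem_append.mp hy with h | h
                · exact h1 y h
                · simp at h; simpa [h] using hx)
            h2
        calc List.foldl (fun acc x => PySem.List.insertBy (fun a b => decide (key a < key b)) x acc)
              ((f0 ++ (f1 ++ [x])) ++ f2) t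
            = ((f0 ++ t.filter (fun v => key v == 0)) ++ ((f1 ++ [x]) ++ t.filter (fun v => key v == 1)))
              ++ (f2 ++ t.filter (fun v => key v == 2)) := this
          _ = ((f0 ++ (x :: t).filter (fun v => key v == 0)) ++ (f1 ++ (x :: t).filter (fun v => key v == 1)))
              ++ (f2 ++ (x :: t).filter (fun v => key v == 2)) := by
              simp [hx]
      · have step : PySem.List.insertBy (fun a b => decide (key a < key b)) x ((f0 ++ f1) ++ f2)
            = (f0 ++ f1) ++ (f2 ++ [x]) := by
          rw [PySem.List.insertBy_of_forall_not_before _ _ _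
              (by intro y hy
                  rcases List.mem_append.mp hy with h | h
                  · rcases List.mem_append.mp h with h' | h'
                    · simp [h0 y h', hx]
                    · simp [h1 y h', hx]
                  · simp [h2 y h, hx])]
          simp
        rw [List.foldl_cons, step,
          ih f0 f1 (f2 ++ [x]) h0 h1
            (by intro y hy; rcases List.mem_append.mp hy with h | h
                · exact h2 y h
                · simp at h; simpa [h] using hx)]
        simp [hx]

theorem length_filter_or {α : Type} (e s : α → Bool) (l : List α) :
    (l.filter (fun v => e v || s v)).length
      = (l.filter e).length + (l.filter (fun v => ! e v && s v)).length := by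
  induction l with
  | nil => simp
  | cons a t ih =>
      by_cases h1 : e a = true <;> by_cases h2 : s a = true <;>
        simp [h1, h2, ih] <;> omega

-- sorted with a 3-valued key is the concatenation of the three stable filters.
theorem sorted_tri {α : Type} (key : α → Int)
    (h3 : ∀ x, key x = 0 ∨ key x = 1 ∨ key x = 2) (xs : List α) :
    PySem.List.sorted xs key
      = xs.filter (fun x => key x == 0) ++ xs.filter (fun x => key x == 1)
        ++ xs.filter (fun x => key x == 2) := by
  rw [PySem.List.sorted_eq_foldl_insertBy]
  have := foldl_insertBy_tri key h3 xs [] [] [] (by simp) (by simp) (by simp)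
  simpa using this

-- ===== VERDICT (by name: the statement is the Claim_ definition above) =====
theorem collect_subtree_spec : Claim_equal_collect_subtree := by
  intro rows prefix_ _ _
  unfold Spec_collect_subtree
  simp only [collect_subtree, collect_subtree_alt]
  rw [foldA_eq]
  set e : List (String × String) → Bool := fun row => pvRowKey row == prefix_ with he
  set s : List (String × String) → Bool :=
    fun row => PySem.Str.startswith (pvRowKey row) (prefix_ ++ ".") with hs
  have h3 : ∀ x, pvCat prefix_ (prefix_ ++ ".") x = 0 ∨ pvCat prefix_ (prefix_ ++ ".") x = 1 ∨
      pvCat prefix_ (prefix_ ++ ".") x = 2 := by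
    intro x; unfold pvCat; split_ifs <;> simp
  rw [sorted_tri _ h3, foldCount_eq]
  have c0 : (fun x => pvCat prefix_ (prefix_ ++ ".") x == 0) = e := by
    funext x; rw [he]; unfold pvCat; split_ifs with h1 h2 <;> simp_all
  have c1 : (fun x => pvCat prefix_ (prefix_ ++ ".") x == 1) = fun v => ! e v && s v := by
    funext x; rw [he, hs]; unfold pvCat; split_ifs with h1 h2 <;> simp_all
  have c2 : (fun x => pvCat prefix_ (prefix_ ++ ".") x == 2) = fun v => ! e v && ! s v := by
    funext x; rw [he, hs]; unfold pvCat; split_ifs with h1 h2 <;> simp_all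
  have clt : (fun x => decide (pvCat prefix_ (prefix_ ++ ".") x < 2)) = fun v => e v || s v := by
    funext x; rw [he, hs]; unfold pvCat; split_ifs with h1 h2 <;> simp_all
  rw [c0, c1, c2, clt]
  -- name the three blocks
  set f0 := rows.filter e with hf0
  set f1 := rows.filter (fun v => ! e v && s v) with hf1
  set f2 := rows.filter (fun v => ! e v && ! s v) with hf2
  have hcut : ((0 : Int) + ((rows.filter (fun v => e v || s v)).length : Int)).toNat
      = (f0 ++ f1).length := by
    rw [hf0, hf1]
    simp [length_filter_or e s rows]
    omega
  have hnn : (0 : Int) ≤ 0 + ((rows.filter (fun v => e v || s v)).length : Int) := by positivity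
  rw [PySem.List.slice_to _ hnn, PySem.List.slice_from _ hnn, hcut,
    List.take_left, List.drop_left]
  -- A side: post-loop refilter of the subtree
  have hfe : (rows.filter (fun row => e row || s row)).filter (fun row => e row) = f0 := by
    rw [hf0, List.filter_filter]
    apply List.filter_congr
    intro a _; cases h : e a <;> simp_all
  have hfo : (rows.filter (fun row => e row || s row)).filter (fun row => ¬ (e row = true)) = f1 := by
    rw [hf1, List.filter_filter]
    apply List.filter_congr
    intro a _; cases h : e a <;> cases h2 : s a <;> simp_all
  have hrest : rows.filter (fun x => ! (e x || s x)) = f2 := by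
    rw [hf2]
    apply List.filter_congr
    intro a _; cases h : e a <;> cases h2 : s a <;> simp_all
  by_cases hemp : rows.filter (fun row => e row || s row) = []
  · have h1 : f0 = [] := by rw [← hfe, hemp]; rfl
    have h2 : f1 = [] := by rw [← hfo, hemp]; rfl
    simp only [List.nil_append]
    rw [if_neg (not_not_intro hemp), hemp, hrest, h1, h2]
    rfl
  · simp only [List.nil_append]
    rw [if_pos hemp, hfe, hfo, hrest]
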